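-- pv_equiv track=rewrite | github.com/xyy9949/Test_twins_with_oopsla | sim/Contacts.py | generate_contacts
-- ===== SOURCE A (Python) =====
-- def generate_contacts(compromised, num_of_nodes):
--     # compromised is like [0,6]
--     # num_of_nodes is one number like 7
--     # then network become [0,1,2,3,4,5,6,7,8]
--     # 0 -> 0,7     6 -> 6,8
--     # contacts is like [[0, 7], [1, 8], [2], [3], [4], [5], [6]]
--     content = []
--     j = 0
--     for i in range(0, num_of_nodes):
--         addresses = []
--         addresses.append(i)
--         if i in compromised:
--             addresses.append(num_of_nodes + j)
--             j += 1
--         content.append(addresses)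
--     return content
-- ===== SOURCE B (Python) =====
-- def generate_contacts(compromised, num_of_nodes):
--     # Build-then-patch: first create every row as a singleton, then scatter the
--     # extra addresses into the rows of the distinct in-range compromised nodes.
--     content = [[i] for i in range(num_of_nodes)]
--     extras = sorted({c for c in compromised if 0 <= c < num_of_nodes})
--     for offset, c in enumerate(extras):
--         content[c].append(num_of_nodes + offset)
--     return content
-- ===== Notes on version B (the rewrite author's own statement) =====
-- stated objective: faster
-- what changed: replaces A's single accumulator-threaded loop that tests 'i in compromised' for every i by a build-then-patch construction: create all singleton rows first, then sort the distinct in-range compromised nodes once and scatter-update only those rows, so no per-row membership scan remains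
import Mathlib
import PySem

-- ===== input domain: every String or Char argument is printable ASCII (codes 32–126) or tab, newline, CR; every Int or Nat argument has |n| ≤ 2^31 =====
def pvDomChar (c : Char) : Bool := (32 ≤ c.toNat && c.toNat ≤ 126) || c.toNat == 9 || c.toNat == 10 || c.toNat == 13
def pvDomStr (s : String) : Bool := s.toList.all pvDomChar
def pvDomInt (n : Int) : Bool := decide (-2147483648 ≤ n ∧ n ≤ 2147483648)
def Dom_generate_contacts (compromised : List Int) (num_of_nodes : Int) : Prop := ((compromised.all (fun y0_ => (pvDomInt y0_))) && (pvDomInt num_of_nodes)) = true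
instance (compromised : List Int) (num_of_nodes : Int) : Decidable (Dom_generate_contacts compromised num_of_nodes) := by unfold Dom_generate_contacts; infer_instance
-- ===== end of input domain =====

-- B builds all singleton rows first and then scatter-updates the rows of the sorted distinct
-- in-range compromised nodes, removing A's per-row membership scan (objective: faster).

-- ===== PORT A =====
-- A threads an accumulator j through a single loop over range(num_of_nodes).
def generate_contacts (compromised : List Int) (num_of_nodes : Int) : List (List Int) :=
  ((PySem.List.pyRange 0 num_of_nodes 1).foldl
    (fun (st : List (List Int) × Int) i =>
      let addresses : List Int := [] ++ [i]
      if compromised.contains i then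
        (st.1 ++ [addresses ++ [num_of_nodes + st.2]], st.2 + 1)
      else
        (st.1 ++ [addresses], st.2))
    ([], 0)).1

-- ===== PORT B =====
-- B: build all singleton rows, then patch the rows of the sorted distinct in-range
-- compromised nodes (content[c].append(...) = read row c, set row c; every c satisfies
-- 0 ≤ c < num_of_nodes = len(content), where pyGetD/pySetD are exact).
def generate_contacts_alt (compromised : List Int) (num_of_nodes : Int) : List (List Int) :=
  let content : List (List Int) := (PySem.List.pyRange 0 num_of_nodes 1).map (fun i => [i])
  let extras : List Int :=
    PySem.List.sorted
      (PySem.Set.ofList (compromised.filter (fun c => decide (0 ≤ c) && decide (c < num_of_nodes))))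
      (fun x => x) false
  (PySem.List.enumerate extras 0).foldl
    (fun ct p => PySem.List.pySetD ct p.2 ((PySem.List.pyGetD ct p.2 []) ++ [num_of_nodes + p.1]))
    content

-- ===== PRECONDITION & SPEC =====
def Spec_generate_contacts (compromised : List Int) (num_of_nodes : Int) (out : List (List Int)) : Prop := out = generate_contacts_alt compromised num_of_nodes
instance (compromised : List Int) (num_of_nodes : Int) (out : List (List Int)) : Decidable (Spec_generate_contacts compromised num_of_nodes out) := by unfold Spec_generate_contacts; infer_instance

-- ===== CLAIM (what is proved, stated in full; the proofs are below) =====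
def Claim_equal_generate_contacts : Prop := ∀ (compromised : List Int) (num_of_nodes : Int), Dom_generate_contacts compromised num_of_nodes → Spec_generate_contacts compromised num_of_nodes (generate_contacts compromised num_of_nodes)

-- ===== LEMMAS AND PROOFS =====

-- the sorted distinct in-range compromised nodes
def pvHits (compromised : List Int) (num_of_nodes : Int) : List Int :=
  PySem.List.sorted
    (PySem.Set.ofList (compromised.filter (fun c => decide (0 ≤ c) && decide (c < num_of_nodes))))
    (fun x => x) false

lemma pvHits_pairwise (compromised : List Int) (n : Int) :
    (pvHits compromised n).Pairwise (· < ·) := by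
  unfold pvHits
  exact PySem.List.sorted_ofList_pairwise_lt _

lemma pvHits_mem (compromised : List Int) (n i : Int) :
    i ∈ pvHits compromised n ↔ i ∈ compromised ∧ 0 ≤ i ∧ i < n := by
  unfold pvHits
  rw [PySem.List.mem_sorted, PySem.Set.mem_ofList, List.mem_filter]
  simp

lemma pvHits_nodup (compromised : List Int) (n : Int) :
    (pvHits compromised n).Nodup := (pvHits_pairwise compromised n).nodup

-- count below b+1 = count below b + multiplicity of b
lemma countP_lt_succ_count (l : List Int) (b : Int) :
    l.countP (fun h => decide (h < b + 1)) = l.countP (fun h => decide (h < b)) + l.count b := by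
  induction l with
  | nil => simp
  | cons x xs ih =>
    rw [List.countP_cons, List.countP_cons, List.count_cons, ih]
    rcases lt_trichotomy x b with h | h | h
    · have h2 : x < b + 1 := by omega
      have h3 : ¬ (x = b) := by omega
      simp [h, h2, h3]
      omega
    · subst h
      simp
      omega
    · have h2 : ¬ (x < b + 1) := by omega
      have h3 : ¬ (x < b) := by omega
      have h5 : ¬ (x = b) := by omega
      simp [h2, h3, h5]

lemma countP_lt_succ (l : List Int) (hnd : l.Nodup) (b : Int) :
    (l.countP (fun h => decide (h < b + 1)) : Int)
      = (l.countP (fun h => decide (h < b)) : Int) + (if b ∈ l then 1 else 0) := by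
  rw [countP_lt_succ_count]
  by_cases hb : b ∈ l
  · rw [List.count_eq_one_of_mem hnd hb]
    simp [hb]
  · rw [List.count_eq_zero_of_not_mem hb]
    simp [hb]

lemma countP_lt_zero_hits (compromised : List Int) (n : Int) :
    ((pvHits compromised n).countP (fun h => decide (h < (0:Int))) : Int) = 0 := by
  have : (pvHits compromised n).countP (fun h => decide (h < (0:Int))) = 0 :=
    List.countP_eq_zero.2 (fun h hh => by
      have := ((pvHits_mem compromised n h).1 hh).2.1
      simp; omega)
  simp [this]

-- A's loop over range(0,k) produces the mapped prefix together with j = count of hits < k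
lemma loopA (compromised : List Int) (n : Int) (k : Nat) (hk : (k : Int) ≤ n) :
    ((PySem.List.pyRange 0 (k : Int) 1).foldl
      (fun (st : List (List Int) × Int) i =>
        let addresses : List Int := [] ++ [i]
        if compromised.contains i then
          (st.1 ++ [addresses ++ [n + st.2]], st.2 + 1)
        else
          (st.1 ++ [addresses], st.2))
      ([], 0))
    = ((PySem.List.pyRange 0 (k : Int) 1).map (fun i =>
         if i ∈ pvHits compromised n
         then [i, n + ((pvHits compromised n).countP (fun h => decide (h < i)) : Int)]
         else [i]),
       ((pvHits compromised n).countP (fun h => decide (h < (k : Int))) : Int)) := by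
  induction k with
  | zero => simp [countP_lt_zero_hits]
  | succ m ih =>
    have hm : (m : Int) ≤ n := by push_cast at hk ⊢; omega
    have hsplit : PySem.List.pyRange 0 ((m : Int) + 1) 1
        = PySem.List.pyRange 0 (m : Int) 1 ++ [(m : Int)] := by
      exact PySem.List.pyRange_one_succ_right (by positivity)
    have hcast : ((m + 1 : Nat) : Int) = (m : Int) + 1 := by push_cast; ring
    rw [hcast, hsplit, List.foldl_append, List.map_append, ih hm]
    have hmemiff : compromised.contains (m : Int) = decide ((m : Int) ∈ pvHits compromised n) := by
      have : (m : Int) ∈ pvHits compromised n ↔ (m : Int) ∈ compromised := by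
        rw [pvHits_mem]
        constructor
        · rintro ⟨h, _, _⟩; exact h
        · intro h; exact ⟨h, by positivity, by omega⟩
      rw [List.contains_eq_mem]
      simp [this]
    have hcount := countP_lt_succ (pvHits compromised n) (pvHits_nodup compromised n) (m : Int)
    by_cases hm' : (m : Int) ∈ pvHits compromised n
    · simp only [List.foldl_cons, List.foldl_nil, List.map_cons, List.map_nil, hmemiff, hm',
        decide_true, if_true]
      rw [hcount]
      simp [hm']
    · simp only [List.foldl_cons, List.foldl_nil, List.map_cons, List.map_nil, hmemiff, hm',
        decide_false, if_false]
      rw [hcount]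
      simp [hm']

-- B's patch loop, pointwise: setting each row of a strictly increasing nonnegative list once
lemma foldl_patch_get? (n : Int) (l : List Int) (s : Int) (ct0 : List (List Int))
    (hp : l.Pairwise (· < ·)) (hnn : ∀ c ∈ l, 0 ≤ c) (m : Nat) :
    ((PySem.List.enumerate l s).foldl
      (fun ct p => PySem.List.pySetD ct p.2 ((PySem.List.pyGetD ct p.2 []) ++ [n + p.1])) ct0)[m]?
    = if (m : Int) ∈ l
      then (ct0[m]?).map (fun r => r ++ [n + s + (l.countP (fun h => decide (h < (m:Int))) : Int)])
      else ct0[m]? := by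
  induction l generalizing s ct0 with
  | nil => simp [PySem.List.enumerate_nil]
  | cons x xs ih =>
    rw [List.pairwise_cons] at hp
    obtain ⟨hx, hxs⟩ := hp
    have hx0 : 0 ≤ x := hnn x List.mem_cons_self
    rw [PySem.List.enumerate_cons]
    simp only [List.foldl_cons]
    rw [PySem.List.pySetD_of_nonneg (h := hx0), PySem.List.pyGetD_of_nonneg (h := hx0)]
    rw [ih _ _ hxs (fun c hc => hnn c (List.mem_cons_of_mem _ hc))]
    by_cases hmem : (m : Int) ∈ xs
    · have hxm : x < (m : Int) := hx _ hmem
      have hne : x.toNat ≠ m := by omega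
      rw [if_pos hmem, if_pos (List.mem_cons_of_mem _ hmem),
        List.getElem?_set_ne hne, List.countP_cons]
      simp only [hxm, decide_true]
      by_cases hlen : m < ct0.length
      · rw [List.getElem?_eq_getElem hlen]
        simp only [Option.map_some, Option.some.injEq, List.append_cancel_left_eq,
          List.cons.injEq, and_true]
        push_cast; ring
      · rw [List.getElem?_eq_none (by omega)]
        simp
    · by_cases hmx : (m : Int) = x
      · have hxnotxs : x ∉ xs := fun h => absurd (hx _ h) (lt_irrefl x)
        have hmm : x.toNat = m := by omega
        rw [if_neg hmem, if_pos (by rw [hmx]; exact List.mem_cons_self)]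
        have hcnt : (x :: xs).countP (fun h => decide (h < (m:Int))) = 0 := by
          apply List.countP_eq_zero.2
          intro h hh
          rcases List.mem_cons.1 hh with rfl | hh
          · simp [hmx]
          · have := hx h hh
            simp
            omega
        rw [hcnt]
        by_cases hlen : m < ct0.length
        · rw [hmm, List.getElem?_set_self (by omega), List.getElem?_eq_getElem hlen]
          simp [List.getD, List.getElem?_eq_getElem hlen]
        · rw [List.getElem?_eq_none (by rw [List.length_set]; omega),
            List.getElem?_eq_none (by omega)]
          simp
      · have hne : x.toNat ≠ m := by omega
        rw [if_neg hmem, if_neg (by simp [hmx, hmem]), List.getElem?_set_ne hne]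

-- ===== VERDICT (by name: the statement is the Claim_ definition above) =====
theorem generate_contacts_spec : Claim_equal_generate_contacts := by
  intro compromised n _
  unfold Spec_generate_contacts generate_contacts generate_contacts_alt
  show _ = (PySem.List.enumerate (pvHits compromised n) 0).foldl _ _
  apply List.ext_getElem?
  intro m
  rw [foldl_patch_get? n (pvHits compromised n) 0 _ (pvHits_pairwise compromised n)
    (fun c hc => ((pvHits_mem compromised n c).1 hc).2.1) m]
  by_cases hn : 0 ≤ n
  · obtain ⟨k, hkeq⟩ := Int.eq_ofNat_of_zero_le hn
    subst hkeq
    rw [loopA compromised (k : Int) k le_rfl]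
    by_cases hm : m < k
    · rw [PySem.List.getElem?_map_pyRange_zero _ _ _ hm,
        PySem.List.getElem?_map_pyRange_zero _ _ _ hm]
      by_cases hmem : (m : Int) ∈ pvHits compromised (k : Int)
      · simp only [hmem, if_pos, Option.map_some, Option.some.injEq]
        simp
      · simp [hmem]
    · have hlen : ∀ f : Int → List Int,
          ((PySem.List.pyRange 0 (k : Int) 1).map f)[m]? = none := by
        intro f
        apply List.getElem?_eq_none
        rw [List.length_map, PySem.List.length_pyRange_one]
        omega
      have hnotmem : (m : Int) ∉ pvHits compromised (k : Int) := by
        intro h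
        have := ((pvHits_mem compromised (k : Int) (m : Int)).1 h).2.2
        omega
      rw [hlen, hlen, if_neg hnotmem]
  · have hneg : PySem.List.pyRange 0 n 1 = [] := PySem.List.pyRange_one_eq_nil (by omega)
    have hhits : pvHits compromised n = [] := by
      rcases List.eq_nil_or_concat (pvHits compromised n) with h | ⟨l, a, h⟩
      · exact h
      · exfalso
        have : a ∈ pvHits compromised n := by rw [h]; simp
        have := ((pvHits_mem compromised n a).1 this).2
        omega
    simp [hneg, hhits]
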